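-- pv_equiv track=rewrite | github.com/HitaloM/PyKorone | src/korone/modules/medias/utils/platforms/twitter/parser.py | _strip_trailing_tco_link
-- ===== SOURCE A (Python) =====
-- def _strip_trailing_tco_link(text: str) -> str:
--     marker = "https://t.co/"
--     index = text.find(marker)
--     if index == -1:
--         return text
--
--     while index > 0 and text[index - 1] in {" ", "\n", "\r"}:
--         index -= 1
--
--     return text[:index]
-- ===== SOURCE B (Python) =====
-- def _strip_trailing_tco_link(text: str) -> str:
--     marker = "https://t.co/"
--     out = []
--     pending = []
--     for i, c in enumerate(text):
--         if text.startswith(marker, i):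
--             return "".join(out)
--         if c in " \n\r":
--             pending.append(c)
--         else:
--             out += pending
--             pending = []
--             out.append(c)
--     return text
-- ===== Notes on version B (the rewrite author's own statement) =====
-- stated objective: alternative
-- what changed: Replaced find + backward whitespace walk + slice by a single forward streaming pass that keeps an output accumulator and a pending-whitespace buffer, emitting the accumulator the moment the marker starts at the current position.
import Mathlib
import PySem

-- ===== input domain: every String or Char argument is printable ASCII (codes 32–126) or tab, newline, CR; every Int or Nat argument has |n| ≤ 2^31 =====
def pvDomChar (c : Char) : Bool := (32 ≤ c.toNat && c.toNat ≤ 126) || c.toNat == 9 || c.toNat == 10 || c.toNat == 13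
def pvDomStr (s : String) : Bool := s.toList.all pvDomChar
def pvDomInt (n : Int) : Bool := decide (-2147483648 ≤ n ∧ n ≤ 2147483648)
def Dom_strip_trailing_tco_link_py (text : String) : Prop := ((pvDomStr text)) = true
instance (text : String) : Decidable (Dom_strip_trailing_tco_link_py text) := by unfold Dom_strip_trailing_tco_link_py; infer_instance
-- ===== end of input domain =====

-- B replaces A's find + backward whitespace walk + slice by a single forward streaming pass
-- with an output accumulator and a pending-whitespace buffer: alternative decomposition, same cost.

-- ===== PORT A =====
-- 'c in {" ", "\n", "\r"}'
def pvAWs (c : Char) : Bool := c == ' ' || c == '\n' || c == '\r'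

-- 'while index > 0 and text[index - 1] in {" ", "\n", "\r"}: index -= 1'
def pvALoop (cs : List Char) : Nat → Nat
  | 0 => 0
  | i + 1 => if (PySem.List.pyGet? cs ((i + 1 : Nat) - 1 : Int)).any pvAWs then pvALoop cs i else i + 1

def strip_trailing_tco_link_py (text : String) : String :=
  let marker := "https://t.co/"
  let index := PySem.Str.find text marker
  if index == -1 then text
  else
    -- text[:index] after the while loop
    String.mk (PySem.Chars.slice text.toList none (some ((pvALoop text.toList index.toNat : Nat) : Int)))

-- ===== PORT B =====
-- 'c in " \n\r"'
def pvBWs (c : Char) : Bool := c == ' ' || c == '\n' || c == '\r'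

-- the for-loop of Source B: walk the characters, keeping 'out' (acc) and 'pending' (pend);
-- 'text.startswith(marker, i)' is the marker being a prefix of the remaining characters;
-- returns 'some out' on the early return, 'none' when the loop falls through.
def pvScan (mk : List Char) : List Char → List Char → List Char → Option (List Char)
  | [], _acc, _pend => none
  | c :: rest, acc, pend =>
    if mk.isPrefixOf (c :: rest) then some acc
    else if pvBWs c then pvScan mk rest acc (pend ++ [c])
    else pvScan mk rest (acc ++ pend ++ [c]) []

def strip_trailing_tco_link_py_alt (text : String) : String :=
  match pvScan "https://t.co/".toList text.toList [] [] with
  | some out => String.mk out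
  | none => text

-- ===== PRECONDITION & SPEC =====
def Spec_strip_trailing_tco_link_py (text : String) (out : String) : Prop := out = strip_trailing_tco_link_py_alt text
instance (text : String) (out : String) : Decidable (Spec_strip_trailing_tco_link_py text out) := by unfold Spec_strip_trailing_tco_link_py; infer_instance

-- ===== CLAIM (what is proved, stated in full; the proofs are below) =====
def Claim_equal_strip_trailing_tco_link_py : Prop := ∀ (text : String), Dom_strip_trailing_tco_link_py text → Spec_strip_trailing_tco_link_py text (strip_trailing_tco_link_py text)

-- ===== LEMMAS AND PROOFS =====

-- remove the trailing run of space/LF/CR characters (proof-side characterisation of both programs)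
def pvRstripWs (cs : List Char) : List Char :=
  (cs.reverse.dropWhile pvBWs).reverse

theorem pvWs_eq : pvBWs = pvAWs := rfl

-- A's backward while loop computes exactly the rstrip of the prefix.
theorem pvALoop_take (cs : List Char) (i : Nat) (h : i ≤ cs.length) :
    cs.take (pvALoop cs i) = pvRstripWs (cs.take i) := by
  induction i with
  | zero => simp [pvALoop, pvRstripWs]
  | succ j ih =>
    have hj : j < cs.length := by omega
    have hget : PySem.List.pyGet? cs ((j + 1 : Nat) - 1 : Int) = some cs[j] := by
      have : ((j + 1 : Nat) - 1 : Int) = (j : Int) := by push_cast; ring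
      rw [this]
      simp [PySem.List.pyGet?, PySem.List.pyIdx?, hj]
    have htake : cs.take (j + 1) = cs.take j ++ [cs[j]] := by
      rw [List.take_succ]
      simp [List.getElem?_eq_getElem hj]
    rw [pvALoop, hget]
    by_cases hp : pvAWs cs[j]
    · simp only [hp, Option.any_some, if_true]
      rw [ih (by omega), pvRstripWs, pvRstripWs, pvWs_eq, htake, List.reverse_append]
      simp only [List.reverse_singleton, List.singleton_append, List.dropWhile_cons, hp, if_true]
    · simp only [Option.any_some, hp]
      rw [pvRstripWs, pvWs_eq, htake, List.reverse_append]
      simp only [List.reverse_singleton, List.singleton_append, List.dropWhile_cons, hp]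
      simp

theorem pvRstripWs_allWs (l : List Char) (h : ∀ c ∈ l, pvBWs c) : pvRstripWs l = [] := by
  unfold pvRstripWs
  rw [List.dropWhile_eq_nil_iff.2 (by intro x hx; exact h x (List.mem_reverse.1 hx))]
  rfl

theorem pvRstripWs_append_cons (ys : List Char) (c : Char) (xs : List Char)
    (hc : pvBWs c = false) :
    pvRstripWs (ys ++ c :: xs) = ys ++ c :: pvRstripWs xs := by
  unfold pvRstripWs
  have : (ys ++ c :: xs).reverse = xs.reverse ++ c :: ys.reverse := by simp
  rw [this, List.dropWhile_append]
  by_cases he : (List.dropWhile pvBWs xs.reverse).isEmpty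
  · rw [if_pos he, List.dropWhile_cons, hc]
    simp only [Bool.false_eq_true, if_false]
    rw [List.isEmpty_iff.1 he]
    simp
  · rw [if_neg he]
    simp

-- find of the marker at the head
theorem pvFind_of_prefix (mk cs : List Char) (hp : mk <+: cs) :
    PySem.Chars.find cs mk = 0 := by
  have hinf : mk <:+: cs := hp.isInfix
  have h0 : 0 ≤ PySem.Chars.find cs mk := (PySem.Chars.find_nonneg_iff cs mk).2 hinf
  have hspec := PySem.Chars.find_spec h0
  by_contra hne
  have hpos : 0 < (PySem.Chars.find cs mk).toNat := by omega
  exact hspec.2 0 hpos (by simpa using hp)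

-- find of the marker one step in
theorem pvFind_cons (mk : List Char) (c : Char) (rest : List Char)
    (hnp : ¬ mk <+: (c :: rest)) :
    PySem.Chars.find (c :: rest) mk =
      if PySem.Chars.find rest mk = -1 then -1 else PySem.Chars.find rest mk + 1 := by
  by_cases hr : PySem.Chars.find rest mk = -1
  · rw [if_pos hr]
    have hni : ¬ mk <:+: rest := (PySem.Chars.find_eq_neg_one_iff rest mk).1 hr
    exact (PySem.Chars.find_eq_neg_one_iff _ mk).2 (by
      intro hinf
      rcases List.infix_cons_iff.1 hinf with h | h
      · exact hnp h
      · exact hni h)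
  · rw [if_neg hr]
    have hg0 : 0 ≤ PySem.Chars.find rest mk := by
      have := PySem.Chars.neg_one_le_find rest mk
      omega
    have hgspec := PySem.Chars.find_spec hg0
    have hinf : mk <:+: (c :: rest) :=
      List.infix_cons_iff.2 (Or.inr ((PySem.Chars.find_ne_neg_one_iff rest mk).1 hr))
    have hf0 : 0 ≤ PySem.Chars.find (c :: rest) mk :=
      (PySem.Chars.find_nonneg_iff _ mk).2 hinf
    have hfspec := PySem.Chars.find_spec hf0
    set f := PySem.Chars.find (c :: rest) mk with hfdef
    set g := PySem.Chars.find rest mk with hgdef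
    have hfpos : 0 < f.toNat := by
      by_contra h
      have : f.toNat = 0 := by omega
      rw [this] at hfspec
      exact hnp (by simpa using hfspec.1)
    -- f.toNat ≤ g.toNat + 1
    have hub : f.toNat ≤ g.toNat + 1 := by
      by_contra h
      have hlt : g.toNat + 1 < f.toNat := by omega
      have : mk <+: (c :: rest).drop (g.toNat + 1) := by
        rw [List.drop_succ_cons]; exact hgspec.1
      exact hfspec.2 _ hlt this
    -- g.toNat ≤ f.toNat - 1
    have hlb : g.toNat ≤ f.toNat - 1 := by
      by_contra h
      have hlt : f.toNat - 1 < g.toNat := by omega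
      have : mk <+: rest.drop (f.toNat - 1) := by
        have hdrop : (c :: rest).drop f.toNat = rest.drop (f.toNat - 1) := by
          obtain ⟨k, hk⟩ : ∃ k, f.toNat = k + 1 := ⟨f.toNat - 1, by omega⟩
          rw [hk, List.drop_succ_cons]
          norm_num
        rw [← hdrop]; exact hfspec.1
      exact hgspec.2 _ hlt this
    omega

-- the streaming pass computes the rstripped prefix before the first marker occurrence
theorem pvScan_eq (mk : List Char) (hmk : mk ≠ []) :
    ∀ (cs acc pend : List Char), (∀ c ∈ pend, pvBWs c) →
      pvScan mk cs acc pend =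
        if PySem.Chars.find cs mk = -1 then none
        else some (acc ++ pvRstripWs (pend ++ cs.take (PySem.Chars.find cs mk).toNat)) := by
  intro cs
  induction cs with
  | nil =>
    intro acc pend _
    have : PySem.Chars.find [] mk = -1 :=
      (PySem.Chars.find_eq_neg_one_iff _ mk).2 (by
        intro h; exact hmk (List.eq_nil_of_infix_nil h))
    simp [pvScan, this]
  | cons c rest ih =>
    intro acc pend hpend
    by_cases hpre : mk.isPrefixOf (c :: rest)
    · have hp : mk <+: (c :: rest) := List.isPrefixOf_iff_prefix.1 hpre
      rw [pvScan, if_pos hpre, pvFind_of_prefix mk _ hp]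
      simp [pvRstripWs_allWs pend hpend]
    · have hnp : ¬ mk <+: (c :: rest) := fun h => hpre (List.isPrefixOf_iff_prefix.2 h)
      rw [pvScan, if_neg hpre, pvFind_cons mk c rest hnp]
      by_cases hr : PySem.Chars.find rest mk = -1
      · rw [if_pos hr]
        by_cases hc : pvBWs c
        · rw [if_pos hc, ih acc (pend ++ [c]) (by
            intro x hx
            rcases List.mem_append.1 hx with h | h
            · exact hpend x h
            · simp at h; subst h; exact hc), if_pos hr]
          simp
        · rw [if_neg hc, ih (acc ++ pend ++ [c]) [] (by intro x hx; simp at hx), if_pos hr]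
          simp
      · rw [if_neg hr]
        have hg0 : 0 ≤ PySem.Chars.find rest mk := by
          have := PySem.Chars.neg_one_le_find rest mk
          omega
        have hne : ¬ (PySem.Chars.find rest mk + 1 = -1) := by omega
        rw [if_neg hne]
        have htn : (PySem.Chars.find rest mk + 1).toNat = (PySem.Chars.find rest mk).toNat + 1 := by
          omega
        rw [htn, List.take_succ_cons]
        by_cases hc : pvBWs c
        · rw [if_pos hc, ih acc (pend ++ [c]) (by
            intro x hx
            rcases List.mem_append.1 hx with h | h
            · exact hpend x h
            · simp at h; subst h; exact hc), if_neg hr]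
          simp
        · rw [if_neg hc, ih (acc ++ pend ++ [c]) [] (by intro x hx; simp at hx), if_neg hr]
          rw [pvRstripWs_append_cons pend c _ (by simpa using hc)]
          simp

-- ===== VERDICT (by name: the statement is the Claim_ definition above) =====
theorem strip_trailing_tco_link_py_spec : Claim_equal_strip_trailing_tco_link_py := by
  intro text _
  unfold Spec_strip_trailing_tco_link_py strip_trailing_tco_link_py strip_trailing_tco_link_py_alt
  simp only [PySem.Str.find_eq]
  set cs := text.toList with hcs
  set mk := "https://t.co/".toList with hmk
  rw [pvScan_eq mk (by rw [hmk]; decide) cs [] [] (by intro x hx; simp at hx)]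
  by_cases hf : PySem.Chars.find cs mk = -1
  · simp [hf]
  · have hnn : 0 ≤ PySem.Chars.find cs mk := by
      have := PySem.Chars.neg_one_le_find cs mk
      omega
    have hle : (PySem.Chars.find cs mk).toNat ≤ cs.length := by
      have := PySem.Chars.find_le_length cs mk
      omega
    simp only [beq_iff_eq, hf, if_false]
    rw [PySem.Chars.slice_eq_listSlice, PySem.List.slice_to_natCast]
    rw [pvALoop_take cs _ hle]
    simp
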